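-- pv_equiv track=rewrite | github.com/Y4tacker/Web-Security | CommonlyUsedScripts/Python无数字shell/source.py | getNumber2
-- ===== SOURCE A (Python) =====
-- def getNumber2(number):
--     number = int(number)
--     if number in [-2, -1, 0, 1]:
--         return ["~([]<())", "~([]<[])",
--                 "([]<[])", "([]<())"][number + 2]
--
--     if number % 2:
--         return "~%s" % getNumber2(~number)
--     else:
--         return "(%s<<([]<()))" % getNumber2(number / 2)
-- ===== SOURCE B (Python) =====
-- def getNumber2(number):
--     number = int(number)
--     # Phase 1: record the reduction ops (True = "~"-complement step, False = halving step)
--     ops = []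
--     while number not in (-2, -1, 0, 1):
--         if number % 2:
--             ops.append(True)
--             number = ~number
--         else:
--             ops.append(False)
--             number = int(number / 2)  # keep A's float-division-then-int semantics
--     # Phase 2: rebuild the expression from the base string, innermost wrapper first
--     s = ("~([]<())", "~([]<[])", "([]<[])", "([]<())")[number + 2]
--     for odd in reversed(ops):
--         s = "~" + s if odd else "(" + s + "<<([]<()))"
--     return s
-- ===== Notes on version B (the rewrite author's own statement) =====
-- stated objective: alternative
-- what changed: Replaced A's self-recursion by a two-phase iterative algorithm: a first loop reduces the number while recording the sequence of ops in a list, then a second loop folds over the reversed op list to wrap the base string.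
import Mathlib
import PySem

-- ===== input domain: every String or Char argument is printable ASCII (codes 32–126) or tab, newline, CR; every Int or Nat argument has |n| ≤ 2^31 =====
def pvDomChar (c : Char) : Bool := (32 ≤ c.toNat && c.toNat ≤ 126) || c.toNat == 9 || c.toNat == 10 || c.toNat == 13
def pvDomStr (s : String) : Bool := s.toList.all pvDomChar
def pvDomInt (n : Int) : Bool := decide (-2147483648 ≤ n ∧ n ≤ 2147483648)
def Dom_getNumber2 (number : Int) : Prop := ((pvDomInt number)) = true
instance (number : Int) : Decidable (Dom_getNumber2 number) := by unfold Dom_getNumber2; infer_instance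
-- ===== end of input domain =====

-- B replaces A's self-recursion by two staged loops: one records the reduction ops in a list,
-- the other folds the reversed list to wrap the base string (alternative decomposition, no speed claim).
-- Both ports are total via a fuel counter (2*|n|+4 strictly dominates the step measure, proved below); the fuel-0 branch is unreachable.

-- ===== PORT A =====
-- `number % 2` with positive divisor: Lean's Int.emod agrees with Python here.
-- `getNumber2(number / 2)` is float division then int(); number is even in that branch, so it
-- equals exact integer division (|number| ≤ 2^31 < 2^53 keeps the float exact either way).
-- `~number` is `-number - 1`; the list index `number + 2` is always in range in its branch.
def getNumber2Go : Nat → Int → String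
  | 0, _ => ""
  | fuel + 1, number =>
    if number = -2 ∨ number = -1 ∨ number = 0 ∨ number = 1 then
      ((PySem.List.pyGet? ["~([]<())", "~([]<[])", "([]<[])", "([]<())"] (number + 2)).getD "")
    else if number % 2 = 1 then
      "~" ++ getNumber2Go fuel (-number - 1)
    else
      "(" ++ getNumber2Go fuel (number / 2) ++ "<<([]<()))"

def getNumber2 (number : Int) : String :=
  getNumber2Go (2 * number.natAbs + 4) number

-- ===== PORT B =====
-- phase 1 of Source B: the while loop, recording the ops list (True = complement, False = halve)
def gn2AltSteps : Nat → List Bool → Int → List Bool × Int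
  | 0, ops, n => (ops, n)
  | fuel + 1, ops, n =>
    if n = -2 ∨ n = -1 ∨ n = 0 ∨ n = 1 then
      (ops, n)
    else if n % 2 = 1 then
      gn2AltSteps fuel (ops ++ [true]) (-n - 1)
    else
      gn2AltSteps fuel (ops ++ [false]) (n / 2)

-- phase 2 of Source B: one wrapping step of the rebuild loop
def gn2AltWrap (s : String) (odd : Bool) : String :=
  if odd then "~" ++ s else "(" ++ s ++ "<<([]<()))"

def getNumber2_alt (number : Int) : String :=
  let r := gn2AltSteps (2 * number.natAbs + 4) [] number
  let base := (PySem.List.pyGet? ["~([]<())", "~([]<[])", "([]<[])", "([]<())"] (r.2 + 2)).getD ""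
  r.1.reverse.foldl gn2AltWrap base

-- ===== PRECONDITION & SPEC =====
def Spec_getNumber2 (number : Int) (out : String) : Prop := out = getNumber2_alt number
instance (number : Int) (out : String) : Decidable (Spec_getNumber2 number out) := by unfold Spec_getNumber2; infer_instance

-- ===== CLAIM (what is proved, stated in full; the proofs are below) =====
def Claim_equal_getNumber2 : Prop := ∀ (number : Int), Dom_getNumber2 number → Spec_getNumber2 number (getNumber2 number)

-- ===== LEMMAS AND PROOFS =====

-- the step measure: strictly decreases at each recursive call, and is < 2*|n|+4
def gn2Measure (n : Int) : Nat :=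
  2 * n.natAbs + (if 1 < n ∧ n % 2 = 1 then 3 else 0)

theorem gn2Measure_lt_fuel (n : Int) : gn2Measure n < 2 * n.natAbs + 4 := by
  simp only [gn2Measure]; split_ifs <;> omega

theorem gn2_dec_odd (n : Int) (h : ¬(n = -2 ∨ n = -1 ∨ n = 0 ∨ n = 1)) (ho : n % 2 = 1) :
    gn2Measure (-n - 1) < gn2Measure n := by
  simp only [gn2Measure]; split_ifs <;> omega

theorem gn2_dec_even (n : Int) (h : ¬(n = -2 ∨ n = -1 ∨ n = 0 ∨ n = 1)) (ho : ¬n % 2 = 1) :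
    gn2Measure (n / 2) < gn2Measure n := by
  simp only [gn2Measure]; split_ifs <;> omega

-- loop invariant: rebuilding from B's recorded steps wraps A's value under the pending ops
theorem gn2AltSteps_rebuild (fuel : Nat) (ops : List Bool) (n : Int)
    (hf : gn2Measure n < fuel) :
    (let r := gn2AltSteps fuel ops n;
     r.1.reverse.foldl gn2AltWrap
       ((PySem.List.pyGet? ["~([]<())", "~([]<[])", "([]<[])", "([]<())"] (r.2 + 2)).getD ""))
    = ops.reverse.foldl gn2AltWrap (getNumber2Go fuel n) := by
  induction fuel generalizing ops n with
  | zero => omega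
  | succ fuel ih =>
    by_cases hb : n = -2 ∨ n = -1 ∨ n = 0 ∨ n = 1
    · simp only [gn2AltSteps, getNumber2Go, if_pos hb]
    · by_cases ho : n % 2 = 1
      · simp only [gn2AltSteps, getNumber2Go, if_neg hb, if_pos ho]
        rw [ih _ _ (by have := gn2_dec_odd n hb ho; omega)]
        simp [gn2AltWrap]
      · simp only [gn2AltSteps, getNumber2Go, if_neg hb, if_neg ho]
        rw [ih _ _ (by have := gn2_dec_even n hb ho; omega)]
        simp [gn2AltWrap]

-- ===== VERDICT (by name: the statement is the Claim_ definition above) =====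
theorem getNumber2_spec : Claim_equal_getNumber2 := by
  intro number _
  unfold Spec_getNumber2 getNumber2 getNumber2_alt
  rw [gn2AltSteps_rebuild _ _ _ (gn2Measure_lt_fuel number)]
  simp
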